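-- pv_equiv track=rewrite | github.com/David-Rushton/AdventOfCode-Solutions | 2023/09/day_09.py | run_numbers
-- ===== SOURCE A (Python) =====
-- def run_numbers(numbers: list[list[int]], level: int=1) -> list[list[int]]:
--     numbers.append([])
--     go_deeper = False
--     for i in range(1, len(numbers[-2])):
--         next_number = numbers[-2][i] - numbers[-2][i -1]
--         numbers[-1].append(next_number)
--         if go_deeper == False and next_number != 0:
--             go_deeper = True
--
--     if go_deeper:
--         return run_numbers(numbers, level + 1)
--     else:
--         return numbers
-- ===== SOURCE B (Python) =====
-- def run_numbers(numbers: list[list[int]], level: int=1) -> list[list[int]]: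
--     # Explicit loop instead of recursion: keep appending the difference row of the
--     # last row (built by zipping it with its own tail) until an all-zero row is appended.
--     while True:
--         prev = numbers[-1]
--         new = [b - a for a, b in zip(prev, prev[1:])]
--         numbers.append(new)
--         if all(v == 0 for v in new):
--             return numbers
-- ===== Notes on version B (the rewrite author's own statement) =====
-- stated objective: alternative
-- what changed: Replaces A's recursion with an appended-flag inner loop by a single explicit while-loop that builds each difference row by zipping the last row with its own tail and stops when the appended row is all zeros.
-- outside the precondition, e.g. on run_numbers([], 1): A raises IndexError, B raises IndexError
import Mathlib
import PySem

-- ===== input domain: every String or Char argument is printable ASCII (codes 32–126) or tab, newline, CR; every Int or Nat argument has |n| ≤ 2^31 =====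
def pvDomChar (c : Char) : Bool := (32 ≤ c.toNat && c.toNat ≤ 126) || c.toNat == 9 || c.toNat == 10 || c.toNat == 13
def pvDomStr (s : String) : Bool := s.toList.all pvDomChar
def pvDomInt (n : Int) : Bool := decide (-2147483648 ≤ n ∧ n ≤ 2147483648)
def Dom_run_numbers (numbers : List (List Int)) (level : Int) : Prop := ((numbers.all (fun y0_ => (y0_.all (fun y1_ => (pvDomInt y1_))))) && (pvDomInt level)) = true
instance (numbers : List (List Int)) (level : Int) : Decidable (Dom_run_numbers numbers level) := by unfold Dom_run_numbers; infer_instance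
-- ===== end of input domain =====

-- B replaces A's recursion by an explicit loop that appends zip-based difference
-- rows until an all-zero row is appended (same in-place mutation in Python; the
-- equivalence proved here is about the returned value).

-- ===== PORT A =====
-- A recurses while some difference is non-zero; each recursion shortens the last
-- row by one, so (last row length + 1) steps always suffice — fuel is only a
-- totality guard, never reached on inputs satisfying Pre_.
def run_numbers_aux : Nat → List (List Int) → Int → List (List Int)
  | 0, numbers, _ => numbers
  | fuel + 1, numbers, level =>
    let ns := numbers ++ [[]]                                   -- numbers.append([])
    let prev := (PySem.List.pyGet? ns (-2)).getD []             -- numbers[-2]; none (IndexError) only outside Pre_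
    let st := (PySem.List.pyRange 1 (prev.length : Int)).foldl  -- for i in range(1, len(numbers[-2]))
      (fun (st : List Int × Bool) i =>
        let next_number := (PySem.List.pyGetD prev i 0) - (PySem.List.pyGetD prev (i - 1) 0)
        (st.1 ++ [next_number],                                 -- numbers[-1].append(next_number)
         if st.2 = false ∧ next_number ≠ 0 then true else st.2))
      ([], false)
    if st.2 then run_numbers_aux fuel (numbers ++ [st.1]) (level + 1)
    else numbers ++ [st.1]

def run_numbers (numbers : List (List Int)) (level : Int) : List (List Int) :=
  run_numbers_aux ((numbers.getLast?.getD []).length + 1) numbers level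

-- ===== PORT B =====
def run_numbers_alt_loop : Nat → List (List Int) → List (List Int)
  | 0, numbers => numbers
  | fuel + 1, numbers =>
    let prev := numbers.getLast?.getD []                        -- numbers[-1]
    let nw := List.zipWith (fun a b => b - a) prev prev.tail    -- [b - a for a, b in zip(prev, prev[1:])]
    let numbers' := numbers ++ [nw]                             -- numbers.append(new)
    if nw.all (· == 0) then numbers'                            -- if all(v == 0 for v in new): return
    else run_numbers_alt_loop fuel numbers'

def run_numbers_alt (numbers : List (List Int)) (level : Int) : List (List Int) :=
  run_numbers_alt_loop ((numbers.getLast?.getD []).length + 1) numbers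

-- ===== PRECONDITION & SPEC =====
-- Pre_ excludes only the empty outer list, on which both Pythons raise IndexError.
def Pre_run_numbers (numbers : List (List Int)) (level : Int) : Prop := numbers ≠ []
instance (numbers : List (List Int)) (level : Int) : Decidable (Pre_run_numbers numbers level) := by unfold Pre_run_numbers; infer_instance

def pvWitness_run_numbers : List (List Int) × Int := ([[1, 3, 6, 10]], 1)

def Spec_run_numbers (numbers : List (List Int)) (level : Int) (out : List (List Int)) : Prop := out = run_numbers_alt numbers level
instance (numbers : List (List Int)) (level : Int) (out : List (List Int)) : Decidable (Spec_run_numbers numbers level out) := by unfold Spec_run_numbers; infer_instance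

-- ===== CLAIM (what is proved, stated in full; the proofs are below) =====
def Claim_equal_run_numbers : Prop := ∀ (numbers : List (List Int)) (level : Int), Dom_run_numbers numbers level → Pre_run_numbers numbers level → Spec_run_numbers numbers level (run_numbers numbers level)

-- ===== LEMMAS AND PROOFS =====

-- numbers[-2] of numbers ++ [[]] is the original last element.
theorem pyGet_append_empty_neg2 (xs : List (List Int)) (h : xs ≠ []) :
    PySem.List.pyGet? (xs ++ [[]]) (-2) = xs.getLast? := by
  have hl : 1 ≤ xs.length := List.length_pos_iff.mpr h
  simp only [PySem.List.pyGet?, PySem.List.pyIdx?, List.length_append, List.length_singleton]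
  rw [if_neg (by omega), if_pos (by push_cast; omega)]
  have hk : xs.length + 1 - (-(-2 : Int)).toNat = xs.length - 1 := by omega
  rw [hk]
  simp only [Option.bind_some]
  rw [List.getElem?_append_left (by omega), List.getLast?_eq_getElem?]

theorem any_ne_eq_not_all_eq (l : List Int) :
    (l.any fun x => decide (x ≠ 0)) = !(l.all (· == 0)) := by
  induction l with
  | nil => rfl
  | cons x t ih => by_cases hx : x = 0 <;> simp [hx, ← ih]

-- The inner for-loop of A, run up to bound n, builds the first n-1 zip
-- differences of prev and the flag "some of them is non-zero".
theorem foldA_spec (prev : List Int) (n : Nat) (hn : n ≤ prev.length) :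
    ∀ (acc : List Int) (b : Bool),
      (PySem.List.pyRange 1 (n : Int)).foldl
        (fun (st : List Int × Bool) i =>
          let next_number := (PySem.List.pyGetD prev i 0) - (PySem.List.pyGetD prev (i - 1) 0)
          (st.1 ++ [next_number],
           if st.2 = false ∧ next_number ≠ 0 then true else st.2))
        (acc, b)
      = (acc ++ (List.zipWith (fun a c => c - a) prev prev.tail).take (n - 1),
         b || ((List.zipWith (fun a c => c - a) prev prev.tail).take (n - 1)).any (fun x => decide (x ≠ 0))) := by
  induction n with
  | zero =>
    intro acc b
    simp [PySem.List.pyRange]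
  | succ n ih =>
    intro acc b
    rcases Nat.eq_zero_or_pos n with hn0 | hn0
    · subst hn0
      simp [PySem.List.pyRange]
    · have hstep : PySem.List.pyRange 1 ((n + 1 : Nat) : Int) =
          PySem.List.pyRange 1 (n : Int) ++ [(n : Int)] := by
        exact_mod_cast PySem.List.pyRange_one_succ_right (b := (n : Int)) (by exact_mod_cast hn0)
      rw [hstep, List.foldl_append, ih (by omega)]
      have hD : (List.zipWith (fun a c => c - a) prev prev.tail).length = prev.length - 1 := by
        simp [List.length_zipWith, List.length_tail]
      have hnn : (PySem.List.pyGetD prev (n : Int) 0) - (PySem.List.pyGetD prev ((n : Int) - 1) 0)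
          = (List.zipWith (fun a c => c - a) prev prev.tail).getD (n - 1) 0 := by
        have h1 : ((n : Int) - 1) = ((n - 1 : Nat) : Int) := by omega
        rw [h1, PySem.List.pyGetD_natCast, PySem.List.pyGetD_natCast]
        have hgz : (List.zipWith (fun a c => c - a) prev prev.tail).getD (n - 1) 0
            = prev.getD n 0 - prev.getD (n - 1) 0 := by
          have hlt : n - 1 < (List.zipWith (fun a c => c - a) prev prev.tail).length := by omega
          have hn1 : n - 1 + 1 = n := by omega
          rw [List.getD_eq_getElem _ _ hlt, List.getElem_zipWith,
            List.getD_eq_getElem _ _ (by omega), List.getD_eq_getElem _ _ (by omega),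
            List.getElem_tail]
          simp only [hn1]
        omega
      have htake : (List.zipWith (fun a c => c - a) prev prev.tail).take (n + 1 - 1)
          = (List.zipWith (fun a c => c - a) prev prev.tail).take (n - 1)
            ++ [(List.zipWith (fun a c => c - a) prev prev.tail).getD (n - 1) 0] := by
      
        have hlt : n - 1 < (List.zipWith (fun a c => c - a) prev prev.tail).length := by omega
        rw [List.getD_eq_getElem _ _ hlt]
        have : n + 1 - 1 = (n - 1) + 1 := by omega
        rw [this, List.take_add_one, List.getElem?_eq_getElem hlt]
        rfl
      simp only [List.foldl_cons, List.foldl_nil, hnn, htake, Prod.mk.injEq]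
      constructor
      · rw [List.append_assoc]
      · rw [List.any_append]
        cases b <;> cases hb2 : ((List.zipWith (fun a c => c - a) prev prev.tail).take (n - 1)).any (fun x => decide (x ≠ 0)) <;>
          by_cases hz : (List.zipWith (fun a c => c - a) prev prev.tail).getD (n - 1) 0 = 0 <;>
          simp [hz]

-- One unfolding of A's recursion equals one unfolding of B's loop.
theorem aux_eq_loop (fuel : Nat) :
    ∀ (numbers : List (List Int)) (level : Int), numbers ≠ [] →
      run_numbers_aux fuel numbers level = run_numbers_alt_loop fuel numbers := by
  induction fuel with
  | zero => intro numbers level _; rfl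
  | succ fuel ih =>
    intro numbers level h
    show (let ns := numbers ++ [[]]
          let prev := (PySem.List.pyGet? ns (-2)).getD []
          let st := (PySem.List.pyRange 1 (prev.length : Int)).foldl
            (fun (st : List Int × Bool) i =>
              let next_number := (PySem.List.pyGetD prev i 0) - (PySem.List.pyGetD prev (i - 1) 0)
              (st.1 ++ [next_number],
               if st.2 = false ∧ next_number ≠ 0 then true else st.2))
            ([], false)
          if st.2 then run_numbers_aux fuel (numbers ++ [st.1]) (level + 1)
          else numbers ++ [st.1]) = _
    simp only [pyGet_append_empty_neg2 numbers h]
    set prev := numbers.getLast?.getD [] with hprev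
    rw [foldA_spec prev prev.length (le_refl _) [] false]
    set D := List.zipWith (fun a c => c - a) prev prev.tail with hD
    have hDfull : D.take (prev.length - 1) = D := by
      apply List.take_of_length_le
      simp [hD, List.length_zipWith, List.length_tail]
    rw [hDfull]
    simp only [List.nil_append, Bool.false_or, any_ne_eq_not_all_eq]
    show (if !D.all (· == 0) then run_numbers_aux fuel (numbers ++ [D]) (level + 1)
          else numbers ++ [D]) = _
    rw [show run_numbers_alt_loop (fuel + 1) numbers =
          (if D.all (· == 0) then numbers ++ [D]
           else run_numbers_alt_loop fuel (numbers ++ [D])) from rfl]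
    cases hall : D.all (· == 0) with
    | true => simp
    | false => simp [ih (numbers ++ [D]) (level + 1) (by simp)]

-- ===== VERDICT (by name: the statement is the Claim_ definition above) =====
theorem run_numbers_spec : Claim_equal_run_numbers := by
  intro numbers level _ hpre
  unfold Spec_run_numbers run_numbers run_numbers_alt
  exact aux_eq_loop _ numbers level hpre
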